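-- pv_equiv track=rewrite | github.com/ChristofferGreen/PrimeStruct | scripts/semantic_memory_benchmark.py | parse_fact_families
-- ===== SOURCE A (Python) =====
-- SEMANTIC_COLLECTOR_FAMILIES = (
--     "definitions",
--     "executions",
--     "direct_call_targets",
--     "method_call_targets",
--     "bridge_path_choices",
--     "callable_summaries",
--     "type_metadata",
--     "struct_field_metadata",
--     "binding_facts",
--     "return_facts",
--     "local_auto_facts",
--     "query_facts",
--     "try_facts",
--     "on_error_facts",
-- )
--
-- def parse_fact_families(text: str) -> str:
--     trimmed = text.strip()
--     if trimmed in ("", "auto", "all", "none"):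
--         return "auto" if trimmed in ("", "auto", "all") else "none"
--     families = [token.strip() for token in trimmed.split(",") if token.strip()]
--     unknown = sorted(set(families).difference(SEMANTIC_COLLECTOR_FAMILIES))
--     if unknown:
--         raise ValueError("unknown semantic collector families: " + ", ".join(unknown))
--     unique: list[str] = []
--     for family in families:
--         if family not in unique:
--             unique.append(family)
--     return ",".join(unique)
-- ===== SOURCE B (Python) =====
-- SEMANTIC_COLLECTOR_FAMILIES = (
--     "definitions",
--     "executions",
--     "direct_call_targets",
--     "method_call_targets",
--     "bridge_path_choices",
--     "callable_summaries",
--     "type_metadata",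
--     "struct_field_metadata",
--     "binding_facts",
--     "return_facts",
--     "local_auto_facts",
--     "query_facts",
--     "try_facts",
--     "on_error_facts",
-- )
--
--
-- def _sieve(fams):
--     # dedup keeping first occurrences by recursively deleting the head's
--     # later duplicates from the tail (no membership scans of an accumulator)
--     if not fams:
--         return []
--     head = fams[0]
--     return [head] + _sieve([f for f in fams[1:] if f != head])
--
--
-- def parse_fact_families(text: str) -> str:
--     trimmed = text.strip()
--     if trimmed in ("", "auto", "all", "none"):
--         return "none" if trimmed == "none" else "auto"
--     tokens = [t for t in (piece.strip() for piece in trimmed.split(",")) if t]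
--     families = _sieve(tokens)
--     unknown = [f for f in sorted(families) if f not in SEMANTIC_COLLECTOR_FAMILIES]
--     if unknown:
--         raise ValueError("unknown semantic collector families: " + ", ".join(unknown))
--     return ",".join(families)
-- ===== Notes on version B (the rewrite author's own statement) =====
-- stated objective: alternative
-- what changed: Dedup is re-done as a recursive sieve that deletes the head's later duplicates from the tail (no seen-set and no membership scan of the accumulator), and validation happens after dedup by filtering the sorted deduped list instead of a set difference over the raw token list.
import Mathlib
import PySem

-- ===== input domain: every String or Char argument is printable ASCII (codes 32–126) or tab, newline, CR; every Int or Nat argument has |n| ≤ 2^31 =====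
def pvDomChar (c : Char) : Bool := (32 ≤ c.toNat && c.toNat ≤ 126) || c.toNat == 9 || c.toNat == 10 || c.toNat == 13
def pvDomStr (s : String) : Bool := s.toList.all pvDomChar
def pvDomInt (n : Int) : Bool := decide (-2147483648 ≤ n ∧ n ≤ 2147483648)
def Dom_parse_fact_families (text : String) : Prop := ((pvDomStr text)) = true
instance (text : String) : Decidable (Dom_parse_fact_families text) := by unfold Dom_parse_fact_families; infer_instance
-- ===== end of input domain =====

-- B replaces A's seen-membership dedup loop and set-difference validation by a recursive
-- sieve (delete the head's later duplicates from the tail, recurse) plus a filter of the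
-- sorted deduped list; equal return values proved wherever A returns (Pre_ excludes the
-- inputs on which A raises ValueError).

def semanticCollectorFamilies : List String :=
  ["definitions", "executions", "direct_call_targets", "method_call_targets",
   "bridge_path_choices", "callable_summaries", "type_metadata",
   "struct_field_metadata", "binding_facts", "return_facts",
   "local_auto_facts", "query_facts", "try_facts", "on_error_facts"]

-- ===== PORT A =====
def parse_fact_families (text : String) : String :=
  let trimmed := PySem.Str.strip text
  if trimmed = "" ∨ trimmed = "auto" ∨ trimmed = "all" ∨ trimmed = "none" then
    if trimmed = "" ∨ trimmed = "auto" ∨ trimmed = "all" then "auto" else "none"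
  else
    let families := (((PySem.Str.split? trimmed ",").getD []).map PySem.Str.strip).filter
      (fun t => t != "")
    let unknown := PySem.List.sorted
      (PySem.Set.diff (PySem.Set.ofList families) (PySem.Set.ofList semanticCollectorFamilies))
      (fun x => x) false
    if unknown ≠ [] then ""   -- Python raises ValueError here; excluded by Pre_
    else
      let unique := families.foldl
        (fun acc family => if family ∈ acc then acc else acc ++ [family]) []
      PySem.Str.join "," unique

-- ===== PORT B =====
-- B's recursive sieve: keep the head, delete its later duplicates from the tail, recurse
def sieveFam : List String → List String
  | [] => []
  | head :: rest => head :: sieveFam (rest.filter (fun g => g != head))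
termination_by l => l.length
decreasing_by
  simp only [List.length_unattach, List.length_cons]
  exact Nat.lt_succ_of_le (le_trans (List.length_filter_le _ _) (by simp))

def parse_fact_families_alt (text : String) : String :=
  let trimmed := PySem.Str.strip text
  if trimmed = "" ∨ trimmed = "auto" ∨ trimmed = "all" ∨ trimmed = "none" then
    if trimmed = "none" then "none" else "auto"
  else
    let tokens := (((PySem.Str.split? trimmed ",").getD []).map PySem.Str.strip).filter
      (fun t => t != "")
    let families := sieveFam tokens
    let unknown := (PySem.List.sorted families (fun x => x) false).filter
      (fun f => decide (f ∉ semanticCollectorFamilies))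
    if unknown ≠ [] then ""   -- Python raises ValueError here; excluded by Pre_
    else PySem.Str.join "," families

-- ===== PRECONDITION & SPEC =====
-- Pre_ excludes exactly the inputs holding a cleaned token outside the family list,
-- on which A raises ValueError (and B raises the same ValueError).
def Pre_parse_fact_families (text : String) : Prop :=
  let trimmed := PySem.Str.strip text
  trimmed = "" ∨ trimmed = "auto" ∨ trimmed = "all" ∨ trimmed = "none" ∨
    ∀ token ∈ (PySem.Str.split? trimmed ",").getD [],
      PySem.Str.strip token = "" ∨ PySem.Str.strip token ∈ semanticCollectorFamilies
instance (text : String) : Decidable (Pre_parse_fact_families text) := by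
  unfold Pre_parse_fact_families; infer_instance

def pvWitness_parse_fact_families : String := " definitions, executions ,definitions,"

def Spec_parse_fact_families (text : String) (out : String) : Prop := out = parse_fact_families_alt text
instance (text : String) (out : String) : Decidable (Spec_parse_fact_families text out) := by unfold Spec_parse_fact_families; infer_instance

-- ===== CLAIM (what is proved, stated in full; the proofs are below) =====
def Claim_equal_parse_fact_families : Prop := ∀ (text : String), Dom_parse_fact_families text → Pre_parse_fact_families text → Spec_parse_fact_families text (parse_fact_families text)

-- ===== LEMMAS AND PROOFS =====

lemma mem_sieveFam_aux (n : Nat) : ∀ l : List String, l.length ≤ n →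
    ∀ x ∈ sieveFam l, x ∈ l := by
  induction n with
  | zero =>
    intro l hl x hx
    rw [List.length_eq_zero_iff.mp (Nat.le_zero.mp hl)] at hx ⊢
    simpa [sieveFam] using hx
  | succ n ih =>
    intro l hl x hx
    match l with
    | [] => simpa [sieveFam] using hx
    | head :: rest =>
      rw [sieveFam] at hx
      rcases List.mem_cons.mp hx with h | h
      · simp [h]
      · have hlen : (rest.filter (fun g => g != head)).length ≤ n :=
          le_trans (List.length_filter_le _ _) (by simpa using hl)
        exact List.mem_cons_of_mem _ (List.mem_of_mem_filter (ih _ hlen x h))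

lemma mem_sieveFam {x : String} {l : List String} (h : x ∈ sieveFam l) : x ∈ l :=
  mem_sieveFam_aux l.length l le_rfl x h

-- A's accumulator dedup loop equals the sieve of the tokens not already in the accumulator
lemma foldl_dedup_eq_sieve (fams : List String) :
    ∀ acc : List String,
      fams.foldl (fun acc family => if family ∈ acc then acc else acc ++ [family]) acc
        = acc ++ sieveFam (fams.filter (fun f => decide (f ∉ acc))) := by
  induction fams with
  | nil => intro acc; simp [sieveFam]
  | cons f fs ih =>
    intro acc
    by_cases hmem : f ∈ acc
    · rw [List.foldl_cons, if_pos hmem, ih acc,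
        List.filter_cons_of_neg (by simp [hmem])]
    · rw [List.foldl_cons, if_neg hmem, ih (acc ++ [f]),
        List.filter_cons_of_pos (by simp [hmem]), sieveFam]
      have hfil : fs.filter (fun g => decide (g ∉ acc ++ [f]))
          = (fs.filter (fun g => decide (g ∉ acc))).filter (fun g => g != f) := by
        rw [List.filter_filter]
        apply List.filter_congr
        intro x _
        by_cases hx : x = f <;> by_cases hxa : x ∈ acc <;> simp [hx, hxa]
      rw [hfil]
      simp

lemma diff_eq_nil_of_subset (s t : List String) (h : ∀ x ∈ s, x ∈ t) :
    PySem.Set.diff (PySem.Set.ofList s) (PySem.Set.ofList t) = [] := by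
  rw [List.eq_nil_iff_forall_not_mem]
  intro x hx
  have hm := (PySem.Set.mem_diff (PySem.Set.ofList s) (PySem.Set.ofList t) x).mp hx
  exact hm.2 ((PySem.Set.mem_ofList t x).mpr (h x ((PySem.Set.mem_ofList s x).mp hm.1)))

-- ===== VERDICT (by name: the statement is the Claim_ definition above) =====
set_option maxHeartbeats 1600000 in
theorem parse_fact_families_spec : Claim_equal_parse_fact_families := by
  intro text _ hpre
  unfold Spec_parse_fact_families
  simp only [parse_fact_families, parse_fact_families_alt]
  by_cases hkw : PySem.Str.strip text = "" ∨ PySem.Str.strip text = "auto" ∨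
      PySem.Str.strip text = "all" ∨ PySem.Str.strip text = "none"
  · rw [if_pos hkw, if_pos hkw]
    by_cases hn : PySem.Str.strip text = "none"
    · rw [if_pos hn, if_neg (by rw [hn]; decide)]
    · have htriple : PySem.Str.strip text = "" ∨ PySem.Str.strip text = "auto" ∨
          PySem.Str.strip text = "all" := by
        rcases hkw with h | h | h | h
        · exact Or.inl h
        · exact Or.inr (Or.inl h)
        · exact Or.inr (Or.inr h)
        · exact absurd h hn
      rw [if_pos htriple, if_neg hn]
  · rw [if_neg hkw, if_neg hkw]
    have hknown : ∀ token ∈ (PySem.Str.split? (PySem.Str.strip text) ",").getD [],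
        PySem.Str.strip token = "" ∨ PySem.Str.strip token ∈ semanticCollectorFamilies := by
      simp only [Pre_parse_fact_families] at hpre
      rcases hpre with h | h | h | h | h
      · exact absurd (Or.inl h) hkw
      · exact absurd (Or.inr (Or.inl h)) hkw
      · exact absurd (Or.inr (Or.inr (Or.inl h))) hkw
      · exact absurd (Or.inr (Or.inr (Or.inr h))) hkw
      · exact h
    have hkn : ∀ f ∈ (((PySem.Str.split? (PySem.Str.strip text) ",").getD []).map
        PySem.Str.strip).filter (fun t => t != ""),
        f ∈ semanticCollectorFamilies := by
      intro f hf
      rw [List.mem_filter] at hf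
      obtain ⟨hf1, hf2⟩ := hf
      obtain ⟨tok, htok, rfl⟩ := List.mem_map.mp hf1
      rcases hknown tok htok with he | hk
      · simp [he] at hf2
      · exact hk
    -- A's unknown is empty
    rw [diff_eq_nil_of_subset _ _ hkn,
      (PySem.List.sorted_eq_nil_iff ([] : List String) (fun x => x) false).mpr rfl]
    -- B's unknown is empty
    have hBunk : ((PySem.List.sorted (sieveFam ((((PySem.Str.split? (PySem.Str.strip text)
        ",").getD []).map PySem.Str.strip).filter (fun t => t != ""))) (fun x => x) false).filter
        (fun f => decide (f ∉ semanticCollectorFamilies))) = [] := by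
      rw [List.filter_eq_nil_iff]
      intro f hf
      have hmem : f ∈ sieveFam ((((PySem.Str.split? (PySem.Str.strip text) ",").getD []).map
          PySem.Str.strip).filter (fun t => t != "")) :=
        (PySem.List.mem_sorted _ _ _ _).mp hf
      simp [hkn f (mem_sieveFam hmem)]
    rw [hBunk]
    simp only [ne_eq, not_true_eq_false, if_false]
    have := foldl_dedup_eq_sieve ((((PySem.Str.split? (PySem.Str.strip text) ",").getD []).map
      PySem.Str.strip).filter (fun t => t != "")) []
    rw [this]
    simp
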